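-- pv_equiv track=rewrite | github.com/TasneemMostafa1/ONL1_AIS4_M9e__Team_2-TasneemMostafa | Task 2_Python App/scripts/new.py | lett
-- ===== SOURCE A (Python) =====
-- def lett(column):
--     result = []
--     for item in column:
--         m = ''
--         k=''
--         for char in item:
--             if char.isalpha() or char==' ':
--                 if k==char:
--                     continue
--                 else:
--                     m += char
--                     k=char
--         result.append(m)
--     return result
-- ===== SOURCE B (Python) =====
-- def lett(column):
--     result = []
--     for item in column:
--         filtered = [c for c in item if c.isalpha() or c == ' ']
--         result.append(''.join(c for p, c in zip([None] + filtered, filtered) if p != c))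
--     return result
-- ===== Notes on version B (the rewrite author's own statement) =====
-- stated objective: idiomatic
-- what changed: Replaced A's fused per-character loop with mutable m/k tracker by a two-stage pipeline: filter to letters/spaces, then drop chars equal to their predecessor via zip with the shifted list.
import Mathlib
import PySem

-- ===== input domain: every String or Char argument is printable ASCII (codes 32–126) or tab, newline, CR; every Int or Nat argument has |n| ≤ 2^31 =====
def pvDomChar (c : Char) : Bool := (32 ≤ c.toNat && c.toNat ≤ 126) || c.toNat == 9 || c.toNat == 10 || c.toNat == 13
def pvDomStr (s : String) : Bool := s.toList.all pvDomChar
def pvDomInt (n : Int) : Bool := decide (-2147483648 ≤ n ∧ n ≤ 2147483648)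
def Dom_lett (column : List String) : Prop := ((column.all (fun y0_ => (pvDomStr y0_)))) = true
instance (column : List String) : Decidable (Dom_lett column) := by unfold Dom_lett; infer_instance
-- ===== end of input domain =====

-- B separates A's fused per-character loop into two stages — filter to letters/spaces,
-- then drop each char equal to its predecessor via zip with the shifted list (objective: idiomatic).


-- ===== PORT A =====
-- inner loop state: (m, k), both strings (k is '' or a single kept char)
def lett (column : List String) : List String :=
  column.foldl (fun result item =>
    let mk := item.toList.foldl (fun (p : List Char × List Char) char =>
      if PySem.Chars.isalpha char || char == ' ' then
        if p.2 == [char] then p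
        else (p.1 ++ [char], [char])
      else p) ([], [])
    result ++ [String.ofList mk.1]) []

-- ===== PORT B =====
def lett_alt (column : List String) : List String :=
  column.foldl (fun result item =>
    let filtered := item.toList.filter (fun c => PySem.Chars.isalpha c || c == ' ')
    result ++ [String.ofList ((((none :: filtered.map some).zip filtered).filter
      (fun p => !(p.1 == some p.2))).map (·.2))]) []

-- ===== PRECONDITION & SPEC =====
def Spec_lett (column : List String) (out : List String) : Prop := out = lett_alt column
instance (column : List String) (out : List String) : Decidable (Spec_lett column out) := by unfold Spec_lett; infer_instance

-- ===== CLAIM (what is proved, stated in full; the proofs are below) =====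
def Claim_equal_lett : Prop := ∀ (column : List String), Dom_lett column → Spec_lett column (lett column)

-- ===== LEMMAS AND PROOFS =====

-- reference collapse: drop a char equal to the last kept one (k = [] or [last kept])
def pvCollapse (k : List Char) : List Char → List Char
  | [] => []
  | c :: t => if k == [c] then pvCollapse k t else c :: pvCollapse [c] t

def pvStepA (p : List Char × List Char) (char : Char) : List Char × List Char :=
  if PySem.Chars.isalpha char || char == ' ' then
    if p.2 == [char] then p else (p.1 ++ [char], [char])
  else p

def pvStepG (p : List Char × List Char) (char : Char) : List Char × List Char :=
  if p.2 == [char] then p else (p.1 ++ [char], [char])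

-- A's loop ignores filtered-out chars: fold over the filtered list
theorem pvFoldA_filter (l : List Char) (p : List Char × List Char) :
    l.foldl pvStepA p = (l.filter (fun c => PySem.Chars.isalpha c || c == ' ')).foldl pvStepG p := by
  induction l generalizing p with
  | nil => rfl
  | cons c t ih =>
      simp only [List.foldl_cons, List.filter_cons]
      by_cases h : (PySem.Chars.isalpha c || c == ' ') = true
      · simp [h, pvStepA, pvStepG, ih]
      · simp [h, pvStepA, ih]

-- A's dedup fold computes pvCollapse
theorem pvFoldG_collapse (l : List Char) (m k : List Char) :
    (l.foldl pvStepG (m, k)).1 = m ++ pvCollapse k l := by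
  induction l generalizing m k with
  | nil => simp [pvCollapse]
  | cons c t ih =>
      simp only [List.foldl_cons, pvStepG, pvCollapse]
      by_cases h : k == [c]
      · simp [h, ih]
      · simp [h, ih]

-- B's zip-with-predecessor computes pvCollapse (k ↔ kopt.toList)
theorem pvZip_collapse (l : List Char) (kopt : Option Char) :
    (((kopt :: l.map some).zip l).filter (fun p => !(p.1 == some p.2))).map (·.2)
      = pvCollapse kopt.toList l := by
  induction l generalizing kopt with
  | nil => cases kopt <;> rfl
  | cons c t ih =>
      simp only [List.map_cons, List.zip_cons_cons, List.filter_cons, pvCollapse]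
      by_cases h : kopt.toList == [c]
      · have hk : kopt = some c := by cases kopt <;> simp_all [Option.toList]
        simp [hk, ih (some c)]
      · have hk : (kopt == some c) = false := by
          cases kopt <;> simp_all [Option.toList]
        simp only [hk, Bool.not_false, if_neg h]
        simp [ih (some c), Option.toList]

theorem pvItem_eq (item : String) :
    (item.toList.foldl pvStepA ([], [])).1
      = ((((none :: (item.toList.filter (fun c => PySem.Chars.isalpha c || c == ' ')).map some).zip
          (item.toList.filter (fun c => PySem.Chars.isalpha c || c == ' '))).filter
          (fun p => !(p.1 == some p.2))).map (·.2)) := by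
  rw [pvFoldA_filter, pvFoldG_collapse, pvZip_collapse]
  rfl

theorem pvFoldl_app_map {α β : Type} (f : α → β) (l : List α) (acc : List β) :
    l.foldl (fun r x => r ++ [f x]) acc = acc ++ l.map f := by
  induction l generalizing acc with
  | nil => simp
  | cons x t ih => simp [ih]

-- ===== VERDICT (by name: the statement is the Claim_ definition above) =====
theorem lett_spec : Claim_equal_lett := by
  intro column _
  show lett column = lett_alt column
  show column.foldl (fun r item => r ++ [String.ofList ((item.toList.foldl pvStepA ([], [])).1)]) []
      = column.foldl (fun r item => r ++ [String.ofList
          ((((none :: (item.toList.filter (fun c => PySem.Chars.isalpha c || c == ' ')).map some).zip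
            (item.toList.filter (fun c => PySem.Chars.isalpha c || c == ' '))).filter
            (fun p => !(p.1 == some p.2))).map (·.2))]) []
  rw [pvFoldl_app_map, pvFoldl_app_map]
  simp only [List.nil_append]
  exact List.map_congr_left (fun item _ => congrArg String.ofList (pvItem_eq item))
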